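-- pv_equiv track=rewrite | github.com/hareesh04-blip/agentic-enterprise-rag-platform | agentic-enterprise-api-rag-backend/app/services/suggested_question_service.py | _primary_api_scope
-- ===== SOURCE A (Python) =====
-- from typing import Any
--
-- def _primary_api_scope(contexts: list[dict[str, Any]]) -> tuple[str | None, str | None]:
--     """Prefer metadata/response chunks so suggested questions match the current retrieval, not arbitrary order."""
--     priority = (
--         "api_response_parameters_chunk",
--         "api_sample_success_response_chunk",
--         "api_metadata_chunk",
--         "api_overview_chunk",
--         "api_request_parameters_chunk",
--         "api_header_parameters_chunk",
--         "api_query_parameters_chunk",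
--         "api_error_codes_chunk",
--         "api_jwt_payload_chunk",
--     )
--     rank = {t: i for i, t in enumerate(priority)}
--     best: tuple[int, int, str | None, str | None] | None = None
--     for idx, item in enumerate(contexts or []):
--         ct = (item.get("chunk_type") or "").strip().lower()
--         if ct not in rank:
--             continue
--         s_raw, r_raw = item.get("service_name"), item.get("api_reference_id")
--         s = str(s_raw).strip() if s_raw else None
--         r = str(r_raw).strip() if r_raw else None
--         if not s and not r:
--             continue
--         cand = (rank[ct], idx, s, r)
--         if best is None or cand[:2] < best[:2]:
--             best = cand
--     if best:
--         return best[2], best[3]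
--     for item in contexts or []:
--         s_raw, r_raw = item.get("service_name"), item.get("api_reference_id")
--         s = str(s_raw).strip() if s_raw else None
--         r = str(r_raw).strip() if r_raw else None
--         if s or r:
--             return s, r
--     return None, None
-- ===== SOURCE B (Python) =====
-- def _primary_api_scope(contexts):
--     """Prefer metadata/response chunks so suggested questions match the current retrieval, not arbitrary order."""
--     priority = (
--         "api_response_parameters_chunk",
--         "api_sample_success_response_chunk",
--         "api_metadata_chunk",
--         "api_overview_chunk",
--         "api_request_parameters_chunk",
--         "api_header_parameters_chunk",
--         "api_query_parameters_chunk",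
--         "api_error_codes_chunk",
--         "api_jwt_payload_chunk",
--     )
--     items = list(contexts or [])
--
--     def norm(item):
--         s_raw, r_raw = item.get("service_name"), item.get("api_reference_id")
--         s = str(s_raw).strip() if s_raw else None
--         r = str(r_raw).strip() if r_raw else None
--         return s, r
--
--     # Walk the priority tiers in order; within a tier take the earliest context.
--     for wanted in priority:
--         for item in items:
--             if (item.get("chunk_type") or "").strip().lower() == wanted:
--                 s, r = norm(item)
--                 if s or r:
--                     return s, r
--
--     for item in items:
--         s, r = norm(item)
--         if s or r:
--             return s, r
--     return None, None
-- ===== Notes on version B (the rewrite author's own statement) =====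
-- stated objective: alternative
-- what changed: Replaces the single-pass rank-dict min-scan keeping a best (rank, idx) tuple with an outer loop over the priority tiers in order, returning the first context of the first tier that has a valid service_name/api_reference_id (same fallback loop).
import Mathlib
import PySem

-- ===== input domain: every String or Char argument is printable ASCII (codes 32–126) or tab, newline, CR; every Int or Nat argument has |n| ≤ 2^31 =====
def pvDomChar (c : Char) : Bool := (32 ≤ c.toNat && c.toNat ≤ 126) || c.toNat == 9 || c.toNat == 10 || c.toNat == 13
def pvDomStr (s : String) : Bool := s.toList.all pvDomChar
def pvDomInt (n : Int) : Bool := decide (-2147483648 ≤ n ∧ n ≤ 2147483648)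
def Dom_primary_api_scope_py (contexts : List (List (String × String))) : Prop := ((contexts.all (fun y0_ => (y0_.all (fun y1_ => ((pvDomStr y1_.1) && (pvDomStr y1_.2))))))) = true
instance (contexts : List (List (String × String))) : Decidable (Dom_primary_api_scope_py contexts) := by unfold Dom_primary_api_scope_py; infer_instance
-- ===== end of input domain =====

-- B walks the priority tiers in order with an inner scan per tier instead of A's single-pass
-- rank-dict min-scan; same return value (alternative decomposition, not claimed faster).


-- ===== PORT A =====
def pvPriorityA : List String :=
  ["api_response_parameters_chunk",
   "api_sample_success_response_chunk",
   "api_metadata_chunk",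
   "api_overview_chunk",
   "api_request_parameters_chunk",
   "api_header_parameters_chunk",
   "api_query_parameters_chunk",
   "api_error_codes_chunk",
   "api_jwt_payload_chunk"]

-- rank = {t: i for i, t in enumerate(priority)}
def pvRankA : PySem.Dict String Int :=
  (PySem.List.enumerate pvPriorityA 0).foldl (fun d p => d.insert p.2 p.1) PySem.Dict.empty

-- str(x).strip() if x else None  (x : Option String; some "" is falsy)
def pvStripOptA (o : Option String) : Option String :=
  match o with
  | some x => if x = "" then none else some (PySem.Str.strip x)
  | none => none

-- Python truthiness of an Option String
def pvTruthyA : Option String → Bool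
  | some x => !(x == "")
  | none => false

-- loop body of A's single pass keeping best = (rank, idx, s, r)
def pvStepA (best : Option (Int × Int × Option String × Option String))
    (p : Int × List (String × String)) : Option (Int × Int × Option String × Option String) :=
  let ct := PySem.Str.lower (PySem.Str.strip ((PySem.Dict.mk p.2).getD "chunk_type" ""))
  match pvRankA.get? ct with
  | none => best
  | some rk =>
    let s := pvStripOptA ((PySem.Dict.mk p.2).get? "service_name")
    let r := pvStripOptA ((PySem.Dict.mk p.2).get? "api_reference_id")
    if !(pvTruthyA s) && !(pvTruthyA r) then best
    else
      match best with
      | none => some (rk, p.1, s, r)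
      | some b =>
        if rk < b.1 ∨ (rk = b.1 ∧ p.1 < b.2.1) then some (rk, p.1, s, r) else some b

-- final 'for item in contexts or []' fallback loop
def pvFallbackA : List (List (String × String)) → Option String × Option String
  | [] => (none, none)
  | item :: rest =>
    let s := pvStripOptA ((PySem.Dict.mk item).get? "service_name")
    let r := pvStripOptA ((PySem.Dict.mk item).get? "api_reference_id")
    if pvTruthyA s || pvTruthyA r then (s, r) else pvFallbackA rest

def primary_api_scope_py (contexts : List (List (String × String))) : Option String × Option String :=
  match (PySem.List.enumerate contexts 0).foldl pvStepA none with
  | some b => (b.2.2.1, b.2.2.2)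
  | none => pvFallbackA contexts

-- ===== PORT B =====
def pvPriorityB : List String :=
  ["api_response_parameters_chunk",
   "api_sample_success_response_chunk",
   "api_metadata_chunk",
   "api_overview_chunk",
   "api_request_parameters_chunk",
   "api_header_parameters_chunk",
   "api_query_parameters_chunk",
   "api_error_codes_chunk",
   "api_jwt_payload_chunk"]

def pvStripOptB (o : Option String) : Option String :=
  match o with
  | some x => if x = "" then none else some (PySem.Str.strip x)
  | none => none

def pvTruthyB : Option String → Bool
  | some x => !(x == "")
  | none => false

-- def norm(item): …
def pvNormB (item : List (String × String)) : Option String × Option String :=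
  (pvStripOptB ((PySem.Dict.mk item).get? "service_name"),
   pvStripOptB ((PySem.Dict.mk item).get? "api_reference_id"))

-- inner scan of one priority tier
def pvFindTierB (t : String) : List (List (String × String)) → Option (Option String × Option String)
  | [] => none
  | item :: rest =>
    if PySem.Str.lower (PySem.Str.strip ((PySem.Dict.mk item).getD "chunk_type" "")) = t then
      let sr := pvNormB item
      if pvTruthyB sr.1 || pvTruthyB sr.2 then some sr else pvFindTierB t rest
    else pvFindTierB t rest

-- outer loop over the priority tiers
def pvTierLoopB : List String → List (List (String × String)) → Option (Option String × Option String)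
  | [], _ => none
  | t :: ts, ctxs =>
    match pvFindTierB t ctxs with
    | some sr => some sr
    | none => pvTierLoopB ts ctxs

def pvFallbackB : List (List (String × String)) → Option String × Option String
  | [] => (none, none)
  | item :: rest =>
    let sr := pvNormB item
    if pvTruthyB sr.1 || pvTruthyB sr.2 then sr else pvFallbackB rest

def primary_api_scope_py_alt (contexts : List (List (String × String))) : Option String × Option String :=
  match pvTierLoopB pvPriorityB contexts with
  | some sr => sr
  | none => pvFallbackB contexts

-- ===== PRECONDITION & SPEC =====
def Spec_primary_api_scope_py (contexts : List (List (String × String))) (out : Option String × Option String) : Prop := out = primary_api_scope_py_alt contexts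
instance (contexts : List (List (String × String))) (out : Option String × Option String) : Decidable (Spec_primary_api_scope_py contexts out) := by unfold Spec_primary_api_scope_py; infer_instance

-- ===== CLAIM (what is proved, stated in full; the proofs are below) =====
def Claim_equal_primary_api_scope_py : Prop := ∀ (contexts : List (List (String × String))), Dom_primary_api_scope_py contexts → Spec_primary_api_scope_py contexts (primary_api_scope_py contexts)

-- ===== LEMMAS AND PROOFS =====

-- normalized chunk_type of an item
def pvCt (item : List (String × String)) : String :=
  PySem.Str.lower (PySem.Str.strip ((PySem.Dict.mk item).getD "chunk_type" ""))

-- rank by position in the priority list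
def pvRankOf (ct : String) : Option Int :=
  (PySem.List.index? pvPriorityA ct).map (fun k => (k : Int))

def pvOut (item : List (String × String)) : Option String × Option String :=
  (pvStripOptA ((PySem.Dict.mk item).get? "service_name"),
   pvStripOptA ((PySem.Dict.mk item).get? "api_reference_id"))

def pvValid (item : List (String × String)) : Bool :=
  pvTruthyA (pvOut item).1 || pvTruthyA (pvOut item).2

-- the qualifying contexts, in order, as (rank, (s, r)) pairs
def pvCands : List (List (String × String)) → List (Int × (Option String × Option String))
  | [] => []
  | item :: rest =>
    match pvRankOf (pvCt item) with
    | some rk => if pvValid item then (rk, pvOut item) :: pvCands rest else pvCands rest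
    | none => pvCands rest

-- keep the strictly smaller rank (first occurrence of the minimum wins)
def pvG (b : Option (Int × (Option String × Option String)))
    (c : Int × (Option String × Option String)) : Option (Int × (Option String × Option String)) :=
  match b with
  | none => some c
  | some b' => if c.1 < b'.1 then some c else some b'

def pvMin? (cs : List (Int × (Option String × Option String))) :
    Option (Int × (Option String × Option String)) := cs.foldl pvG none

-- first tier (from rs, strictly increasing) that has a candidate; its first candidate
def pvFirstSome : List Int → List (Int × (Option String × Option String)) → Option (Option String × Option String)
  | [], _ => none
  | r :: rs, cs =>
    match cs.find? (fun d => d.1 == r) with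
    | some c => some c.2
    | none => pvFirstSome rs cs


lemma pvStripOptB_eq : pvStripOptB = pvStripOptA := by
  funext o; cases o <;> rfl

lemma pvTruthyB_eq : pvTruthyB = pvTruthyA := by
  funext o; cases o <;> rfl

lemma pvNormB_eq (item : List (String × String)) : pvNormB item = pvOut item := by
  simp [pvNormB, pvOut, pvStripOptB_eq]

lemma pvRank_get? (ct : String) : pvRankA.get? ct = pvRankOf ct := by
  have hA : pvRankA = PySem.Dict.mk
      [("api_response_parameters_chunk", (0 : Int)),
       ("api_sample_success_response_chunk", 1),
       ("api_metadata_chunk", 2),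
       ("api_overview_chunk", 3),
       ("api_request_parameters_chunk", 4),
       ("api_header_parameters_chunk", 5),
       ("api_query_parameters_chunk", 6),
       ("api_error_codes_chunk", 7),
       ("api_jwt_payload_chunk", 8)] := by rfl
  by_cases h1 : ct = "api_response_parameters_chunk"
  · subst h1; rfl
  by_cases h2 : ct = "api_sample_success_response_chunk"
  · subst h2; rfl
  by_cases h3 : ct = "api_metadata_chunk"
  · subst h3; rfl
  by_cases h4 : ct = "api_overview_chunk"
  · subst h4; rfl
  by_cases h5 : ct = "api_request_parameters_chunk"
  · subst h5; rfl
  by_cases h6 : ct = "api_header_parameters_chunk"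
  · subst h6; rfl
  by_cases h7 : ct = "api_query_parameters_chunk"
  · subst h7; rfl
  by_cases h8 : ct = "api_error_codes_chunk"
  · subst h8; rfl
  by_cases h9 : ct = "api_jwt_payload_chunk"
  · subst h9; rfl
  have hnot : ct ∉ pvPriorityA := by
    simp [pvPriorityA, h1, h2, h3, h4, h5, h6, h7, h8, h9]
  have hidx : List.idxOf? ct pvPriorityA = none := List.idxOf?_eq_none_iff.mpr hnot
  rw [hA]
  simp [pvRankOf, PySem.List.index?_eq_idxOf?, hidx, PySem.Dict.get?,
        Ne.symm h1, Ne.symm h2, Ne.symm h3, Ne.symm h4, Ne.symm h5,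
        Ne.symm h6, Ne.symm h7, Ne.symm h8, Ne.symm h9]

lemma pvG_acc (cs : List (Int × (Option String × Option String)))
    (b : Int × (Option String × Option String)) :
    cs.foldl pvG (some b) =
      match pvMin? cs with
      | none => some b
      | some c => if c.1 < b.1 then some c else some b := by
  induction cs generalizing b with
  | nil => simp [pvMin?]
  | cons e tl ih =>
    have hmin : pvMin? (e :: tl) = tl.foldl pvG (some e) := by
      simp [pvMin?, List.foldl, pvG]
    rw [hmin, ih e]
    show tl.foldl pvG (pvG (some b) e) = _
    by_cases he : e.1 < b.1
    · rw [show pvG (some b) e = some e from by simp [pvG, he], ih e]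
      rcases h : pvMin? tl with _ | c
      · simp [he]
      · by_cases hc : c.1 < e.1
        · have hcb : c.1 < b.1 := by omega
          simp [hc, hcb]
        · simp [hc, he]
    · rw [show pvG (some b) e = some b from by simp [pvG, he], ih b]
      rcases h : pvMin? tl with _ | c
      · simp [he]
      · by_cases hc : c.1 < e.1
        · simp [hc]
        · have hcb : ¬ c.1 < b.1 := by omega
          simp [hc, he, hcb]

lemma pvMin?_mem {cs : List (Int × (Option String × Option String))} {c} (h : pvMin? cs = some c) :
    c ∈ cs := by
  induction cs with
  | nil => simp [pvMin?] at h
  | cons e tl ih =>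
    have hmin : pvMin? (e :: tl) = tl.foldl pvG (some e) := by
      simp [pvMin?, List.foldl, pvG]
    rw [hmin, pvG_acc] at h
    rcases h' : pvMin? tl with _ | c'
    · rw [h'] at h; simp at h; simp [h]
    · rw [h'] at h
      by_cases hc : c'.1 < e.1
      · simp [hc] at h; subst h; exact List.mem_cons_of_mem _ (ih h')
      · simp [hc] at h; simp [h]

lemma pvFindMin {cs : List (Int × (Option String × Option String))} {r : Int} {c}
    (hle : ∀ d ∈ cs, r ≤ d.1) (hf : cs.find? (fun d => d.1 == r) = some c) :
    pvMin? cs = some c := by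
  induction cs with
  | nil => simp at hf
  | cons e tl ih =>
    have hmin : pvMin? (e :: tl) = tl.foldl pvG (some e) := by
      simp [pvMin?, List.foldl, pvG]
    by_cases he : e.1 = r
    · have hfe : List.find? (fun d => d.1 == r) (e :: tl) = some e := by
        rw [List.find?_cons_of_pos]
        simp [he]
      rw [hfe] at hf
      injection hf with hf
      subst hf
      rw [hmin, pvG_acc]
      rcases h' : pvMin? tl with _ | c'
      · simp
      · have hc' : c' ∈ tl := pvMin?_mem h'
        have hnlt : ¬ c'.1 < e.1 := by
          have := hle c' (List.mem_cons_of_mem _ hc'); omega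
        simp [hnlt]
    · have hf' : tl.find? (fun d => d.1 == r) = some c := by
        rw [List.find?_cons_of_neg] at hf
        · exact hf
        · simp [he]
      have hle' : ∀ d ∈ tl, r ≤ d.1 := fun d hd => hle d (List.mem_cons_of_mem _ hd)
      rw [hmin, pvG_acc, ih hle' hf']
      have hcr : c.1 = r := by
        have := List.find?_some hf'; simpa using this
      have her : r ≤ e.1 := hle e List.mem_cons_self
      have hlt : c.1 < e.1 := by omega
      simp [hlt]

lemma pvA_fold (ctxs : List (List (String × String))) : ∀ (i : Int)
    (b : Option (Int × Int × Option String × Option String)),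
    (∀ x, b = some x → x.2.1 < i) →
    ((PySem.List.enumerate ctxs i).foldl pvStepA b).map (fun x => (x.1, x.2.2)) =
      (pvCands ctxs).foldl pvG (b.map (fun x => (x.1, x.2.2))) := by
  induction ctxs with
  | nil => intro i b hb; simp [PySem.List.enumerate_nil, pvCands]
  | cons item rest ih =>
    intro i b hb
    rw [PySem.List.enumerate_cons, List.foldl_cons]
    have hr := pvRank_get? (pvCt item)
    simp only [pvCt] at hr
    rcases hrk0 : pvRankOf (pvCt item) with _ | rk
    · -- chunk_type not ranked: both sides skip the item
      have hrk := hrk0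
      simp only [pvCt] at hrk
      have hstep : pvStepA b (i, item) = b := by
        simp only [pvStepA, hr, hrk]
      have hc : pvCands (item :: rest) = pvCands rest := by
        simp only [pvCands]; rw [hrk0]
      rw [hstep, hc]
      exact ih (i + 1) b (fun x hx => by have := hb x hx; omega)
    · have hrk := hrk0
      simp only [pvCt] at hrk
      have hc : pvCands (item :: rest) =
          if pvValid item then (rk, pvOut item) :: pvCands rest else pvCands rest := by
        simp only [pvCands]; rw [hrk0]
      rcases hv : pvValid item with _ | _
      · -- no usable service/reference: both sides skip
        have hv' := hv
        simp only [pvValid, Bool.or_eq_false_iff] at hv'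
        have hstep : pvStepA b (i, item) = b := by
          simp only [pvStepA, hr, hrk, pvOut] at *
          simp [hv'.1, hv'.2]
        rw [hstep, hc, hv]
        simp only [Bool.false_eq_true, if_false]
        exact ih (i + 1) b (fun x hx => by have := hb x hx; omega)
      · -- a candidate
        have hv' := hv
        simp only [pvValid, Bool.or_eq_true] at hv'
        have hval : (!pvTruthyA (pvOut item).1 && !pvTruthyA (pvOut item).2) = false := by
          rcases hv' with h | h <;> simp [h]
        rw [hc, hv]
        simp only [if_true, List.foldl_cons]
        rcases b with _ | bb
        · have hstep : pvStepA none (i, item) =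
              some (rk, i, (pvOut item).1, (pvOut item).2) := by
            simp only [pvStepA, hr, hrk, pvOut] at hval ⊢
            simp [hval]
          rw [hstep]
          rw [ih (i + 1) _ (by intro x hx; cases hx; show i < i + 1; omega)]
          rfl
        · have hbi : bb.2.1 < i := hb bb rfl
          have hcond : (rk < bb.1 ∨ (rk = bb.1 ∧ i < bb.2.1)) ↔ rk < bb.1 := by
            constructor
            · rintro (h | ⟨h1, h2⟩)
              · exact h
              · omega
            · exact Or.inl
          have hstep : pvStepA (some bb) (i, item) =
              if rk < bb.1 then some (rk, i, (pvOut item).1, (pvOut item).2) else some bb := by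
            simp only [pvStepA, hr, hrk, pvOut] at hval ⊢
            simp only [hval, Bool.false_eq_true, if_false]
            rw [if_congr hcond rfl rfl]
          rw [hstep]
          by_cases hlt : rk < bb.1
          · rw [if_pos hlt]
            rw [ih (i + 1) _ (by intro x hx; cases hx; show i < i + 1; omega)]
            have hg : pvG (some (bb.1, bb.2.2)) (rk, pvOut item) = some (rk, pvOut item) := by
              simp [pvG, hlt]
            simp only [Option.map_some, hg]
          · rw [if_neg hlt]
            rw [ih (i + 1) _ (by intro x hx; cases hx; omega)]
            have hg : pvG (some (bb.1, bb.2.2)) (rk, pvOut item) = some (bb.1, bb.2.2) := by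
              simp [pvG, hlt]
            simp only [Option.map_some, hg]

lemma pvRankOf_inj {a b : String} {rk : Int} (ha : pvRankOf a = some rk)
    (hb : pvRankOf b = some rk) : a = b := by
  unfold pvRankOf at ha hb
  rcases hia : PySem.List.index? pvPriorityA a with _ | ka <;> rw [hia] at ha
  · simp at ha
  rcases hib : PySem.List.index? pvPriorityA b with _ | kb <;> rw [hib] at hb
  · simp at hb
  simp at ha hb
  have hk : ka = kb := by omega
  subst hk
  obtain ⟨hka, h2, -⟩ := PySem.List.getElem_of_index?_eq_some hia
  obtain ⟨hkb, h2', -⟩ := PySem.List.getElem_of_index?_eq_some hib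
  rw [← h2, ← h2']

lemma pvB_find (t : String) (rk : Int) (ctxs : List (List (String × String)))
    (ht : pvRankOf t = some rk) :
    pvFindTierB t ctxs = ((pvCands ctxs).find? (fun d => d.1 == rk)).map (·.2) := by
  induction ctxs with
  | nil => rfl
  | cons item rest ih =>
    by_cases hct : pvCt item = t
    · have hstep : pvFindTierB t (item :: rest) =
          if pvValid item then some (pvOut item) else pvFindTierB t rest := by
        simp only [pvFindTierB, pvCt] at hct ⊢
        rw [if_pos hct, pvNormB_eq, pvTruthyB_eq]
        rfl
      have hrk : pvRankOf (pvCt item) = some rk := by rw [hct]; exact ht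
      have hc : pvCands (item :: rest) =
          if pvValid item then (rk, pvOut item) :: pvCands rest else pvCands rest := by
        simp only [pvCands]; rw [hrk]
      rw [hstep, hc]
      cases hv : pvValid item
      · simp only [Bool.false_eq_true, if_false]
        exact ih
      · simp only [if_true]
        rw [List.find?_cons_of_pos (by simp)]
        rfl
    · have hstep : pvFindTierB t (item :: rest) = pvFindTierB t rest := by
        simp only [pvFindTierB, pvCt] at hct ⊢
        rw [if_neg hct]
      rw [hstep]
      rcases hrk : pvRankOf (pvCt item) with _ | rk'
      · rw [show pvCands (item :: rest) = pvCands rest from by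
          simp only [pvCands]; rw [hrk]]
        exact ih
      · have hne : rk' ≠ rk := fun h => hct (pvRankOf_inj (h ▸ hrk) ht)
        rw [show pvCands (item :: rest) =
            (if pvValid item then (rk', pvOut item) :: pvCands rest else pvCands rest) from by
          simp only [pvCands]; rw [hrk]]
        cases hv : pvValid item
        · simp only [Bool.false_eq_true, if_false]
          exact ih
        · simp only [if_true]
          rw [List.find?_cons_of_neg (by simp [hne])]
          exact ih

lemma pvB_loop (ts : List String) : ∀ (rs : List Int) (ctxs : List (List (String × String))),
    ts.map pvRankOf = rs.map some →
    pvTierLoopB ts ctxs = pvFirstSome rs (pvCands ctxs) := by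
  induction ts with
  | nil =>
    intro rs ctxs h
    have : rs = [] := by
      cases rs with
      | nil => rfl
      | cons r rs' => simp at h
    subst this; rfl
  | cons t ts' ih =>
    intro rs ctxs h
    cases rs with
    | nil => simp at h
    | cons r rs' =>
      simp only [List.map_cons, List.cons.injEq] at h
      obtain ⟨h1, h2⟩ := h
      simp only [pvTierLoopB, pvFirstSome]
      rw [pvB_find t r ctxs h1]
      rcases hf : (pvCands ctxs).find? (fun d => d.1 == r) with _ | c <;> rw [hf]
      · exact ih rs' ctxs h2
      · rfl

lemma pvFirstSome_min (rs : List Int) : ∀ (cs : List (Int × (Option String × Option String))),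
    rs.Pairwise (· < ·) → (∀ c ∈ cs, c.1 ∈ rs) →
    pvFirstSome rs cs = (pvMin? cs).map (·.2) := by
  induction rs with
  | nil =>
    intro cs hp hmem
    cases cs with
    | nil => rfl
    | cons c cs' => simpa using hmem c List.mem_cons_self
  | cons r rs' ih =>
    intro cs hp hmem
    simp only [pvFirstSome]
    rcases hf : cs.find? (fun d => d.1 == r) with _ | c <;> rw [hf]
    · have hmem' : ∀ c ∈ cs, c.1 ∈ rs' := by
        intro c hc
        rcases List.mem_cons.mp (hmem c hc) with h | h
        · exfalso
          have := List.find?_eq_none.mp hf c hc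
          simp [h] at this
        · exact h
      exact ih cs (List.Pairwise.of_cons hp) hmem'
    · have hr' : ∀ a ∈ rs', r < a := (List.pairwise_cons.mp hp).1
      have hle : ∀ d ∈ cs, r ≤ d.1 := by
        intro d hd
        rcases List.mem_cons.mp (hmem d hd) with h | h
        · omega
        · have := hr' _ h; omega
      rw [pvFindMin hle hf]
      rfl

lemma pvCands_rank_mem (ctxs : List (List (String × String))) :
    ∀ c ∈ pvCands ctxs, c.1 ∈ ([0, 1, 2, 3, 4, 5, 6, 7, 8] : List Int) := by
  induction ctxs with
  | nil => simp [pvCands]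
  | cons item rest ih =>
    intro c hc
    rcases hrk : pvRankOf (pvCt item) with _ | rk
    · rw [show pvCands (item :: rest) = pvCands rest from by
        simp only [pvCands]; rw [hrk]] at hc
      exact ih c hc
    · rw [show pvCands (item :: rest) =
          (if pvValid item then (rk, pvOut item) :: pvCands rest else pvCands rest) from by
        simp only [pvCands]; rw [hrk]] at hc
      cases hv : pvValid item
      · rw [hv] at hc
        simp only [Bool.false_eq_true, if_false] at hc
        exact ih c hc
      · rw [hv] at hc
        simp only [if_true] at hc
        rcases List.mem_cons.mp hc with hceq | hc'
        · subst hceq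
          unfold pvRankOf at hrk
          rcases hia : PySem.List.index? pvPriorityA (pvCt item) with _ | k <;> rw [hia] at hrk
          · simp at hrk
          · obtain ⟨hlt, -, -⟩ := PySem.List.getElem_of_index?_eq_some hia
            have hk9 : k < 9 := by simp [pvPriorityA] at hlt; omega
            have hkk : rk = (k : Int) := by simp at hrk; omega
            rw [hkk]
            show (k : Int) ∈ _
            interval_cases k <;> decide
        · exact ih c hc'

lemma pvFallback_eq (ctxs : List (List (String × String))) :
    pvFallbackA ctxs = pvFallbackB ctxs := by
  induction ctxs with
  | nil => rfl
  | cons item rest ih =>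
    simp only [pvFallbackA, pvFallbackB, pvNormB_eq, pvTruthyB_eq, pvOut]
    rw [ih]

-- ===== VERDICT (by name: the statement is the Claim_ definition above) =====
theorem primary_api_scope_py_spec : Claim_equal_primary_api_scope_py := by
  intro ctxs _
  unfold Spec_primary_api_scope_py
  have hA := pvA_fold ctxs 0 none (by intro x hx; cases hx)
  simp only [Option.map_none] at hA
  have hB : pvTierLoopB pvPriorityB ctxs = (pvMin? (pvCands ctxs)).map (·.2) := by
    rw [pvB_loop pvPriorityB [0, 1, 2, 3, 4, 5, 6, 7, 8] ctxs (by decide)]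
    exact pvFirstSome_min _ _ (by decide) (pvCands_rank_mem ctxs)
  unfold primary_api_scope_py primary_api_scope_py_alt
  rw [hB]
  have hmin : pvMin? (pvCands ctxs) =
      ((PySem.List.enumerate ctxs 0).foldl pvStepA none).map (fun x => (x.1, x.2.2)) := hA.symm
  rw [hmin]
  rcases hres : (PySem.List.enumerate ctxs 0).foldl pvStepA none with _ | x
  · simp [pvFallback_eq]
  · rfl
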